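-- pv_equiv track=rewrite | github.com/tkchafin/serverless_rad | lithopsrad/sequence.py | simple_counter
-- ===== SOURCE A (Python) =====
-- def simple_counter(seq):
--     d = {}
--     d = {
--         'N':0,
--         '-':0,
--         '*':0
--     }
--     for c in seq:
--         if c in d:
--             d[c] += 1
--     return d
-- ===== SOURCE B (Python) =====
-- def simple_counter(seq):
--     # Three staged scans with str.count instead of a per-character conditional loop.
--     return {key: seq.count(key) for key in ('N', '-', '*')}
-- ===== Notes on version B (the rewrite author's own statement) =====
-- stated objective: idiomatic
-- what changed: B drops A's per-character loop with an if-key-in-dict increment entirely and instead runs three staged str.count scans (one per tracked character), building the result dict by comprehension.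
import Mathlib
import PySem

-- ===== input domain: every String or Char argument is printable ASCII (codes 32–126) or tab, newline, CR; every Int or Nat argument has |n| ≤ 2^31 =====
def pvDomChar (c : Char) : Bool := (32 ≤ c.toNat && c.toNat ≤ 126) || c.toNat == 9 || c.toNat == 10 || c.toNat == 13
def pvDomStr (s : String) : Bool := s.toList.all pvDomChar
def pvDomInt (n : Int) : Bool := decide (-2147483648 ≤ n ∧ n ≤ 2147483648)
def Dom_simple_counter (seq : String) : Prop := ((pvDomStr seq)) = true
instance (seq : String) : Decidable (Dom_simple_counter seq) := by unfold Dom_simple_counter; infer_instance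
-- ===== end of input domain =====

-- ===== PORT A =====
-- B replaces A's per-character conditional-increment loop with three staged str.count scans.
def simple_counter (seq : String) : List (String × Int) :=
  let d0 : PySem.Dict String Int :=
    ((PySem.Dict.empty.insert "N" 0).insert "-" 0).insert "*" 0
  let d := (seq.toList.map (fun ch => String.ofList [ch])).foldl
    (fun d c => if d.contains c then d.modify c 0 (· + 1) else d) d0
  d.items

-- ===== PORT B =====
def simple_counter_alt (seq : String) : List (String × Int) :=
  ["N", "-", "*"].map (fun key => (key, (PySem.Str.count seq key : Int)))

-- ===== PRECONDITION & SPEC =====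
def Spec_simple_counter (seq : String) (out : List (String × Int)) : Prop := out = simple_counter_alt seq
instance (seq : String) (out : List (String × Int)) : Decidable (Spec_simple_counter seq out) := by unfold Spec_simple_counter; infer_instance

-- ===== CLAIM (what is proved, stated in full; the proofs are below) =====
def Claim_equal_simple_counter : Prop := ∀ (seq : String), Dom_simple_counter seq → Spec_simple_counter seq (simple_counter seq)

-- ===== LEMMAS AND PROOFS =====

lemma step_mk (a b c : Int) (x : String) :
    (if (PySem.Dict.mk [("N", a), ("-", b), ("*", c)]).contains x then
        (PySem.Dict.mk [("N", a), ("-", b), ("*", c)]).modify x 0 (· + 1)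
      else PySem.Dict.mk [("N", a), ("-", b), ("*", c)])
    = PySem.Dict.mk [("N", a + if x = "N" then 1 else 0),
                     ("-", b + if x = "-" then 1 else 0),
                     ("*", c + if x = "*" then 1 else 0)] := by
  by_cases hN : x = "N"
  · subst hN
    simp [PySem.Dict.contains, PySem.Dict.modify, PySem.Dict.insert,
      PySem.Dict.getD_eq_get?_getD, PySem.Dict.get?_mk_cons]
  · by_cases hD : x = "-"
    · subst hD
      simp [PySem.Dict.contains, PySem.Dict.modify, PySem.Dict.insert,
        PySem.Dict.getD_eq_get?_getD, PySem.Dict.get?_mk_cons]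
    · by_cases hS : x = "*"
      · subst hS
        simp [PySem.Dict.contains, PySem.Dict.modify, PySem.Dict.insert,
          PySem.Dict.getD_eq_get?_getD, PySem.Dict.get?_mk_cons]
      · simp [PySem.Dict.contains, Ne.symm hN, Ne.symm hD, Ne.symm hS]
        exact ⟨hN, hD, hS⟩

lemma a_loop (l : List String) (a b c : Int) :
    (l.foldl (fun d x => if d.contains x then d.modify x 0 (· + 1) else d)
      (PySem.Dict.mk [("N", a), ("-", b), ("*", c)])).items
    = [("N", a + l.count "N"), ("-", b + l.count "-"), ("*", c + l.count "*")] := by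
  induction l generalizing a b c with
  | nil => simp
  | cons x l ih =>
    simp only [List.foldl_cons, step_mk, ih, List.count_cons, beq_iff_eq]
    push_cast
    ring_nf

-- single-character substring counting coincides with element counting
lemma count_go_singleton (c : Char) (l : List Char) (fuel acc : Nat)
    (h : l.length ≤ fuel) :
    PySem.Chars.count.go [c] fuel l acc = acc + l.count c := by
  induction l generalizing fuel acc with
  | nil => cases fuel <;> simp [PySem.Chars.count.go]
  | cons x t ih =>
    cases fuel with
    | zero => simp at h
    | succ n =>
      simp only [List.length_cons, Nat.succ_le_succ_iff] at h
      by_cases hx : x = c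
      · subst hx
        simp [PySem.Chars.count.go, List.isPrefixOf, ih _ _ h]
        omega
      · simp [PySem.Chars.count.go, List.isPrefixOf, hx, ih _ _ h,
          Ne.symm hx]

lemma str_count_singleton (s : String) (c : Char) :
    PySem.Str.count s (String.ofList [c]) = s.toList.count c := by
  rw [PySem.Str.count_eq]
  simp only [PySem.Chars.count, String.toList_ofList, List.isEmpty_cons, if_neg Bool.false_ne_true]
  rw [count_go_singleton c s.toList s.toList.length 0 le_rfl]
  simp

lemma ofList_injective : Function.Injective (fun ch => String.ofList [ch]) := by
  intro a b h
  simpa using congrArg String.toList h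

-- ===== VERDICT (by name: the statement is the Claim_ definition above) =====
theorem simple_counter_spec : Claim_equal_simple_counter := by
  intro seq _
  unfold Spec_simple_counter simple_counter simple_counter_alt
  have h0 : ((PySem.Dict.empty.insert "N" (0:Int)).insert "-" 0).insert "*" 0
      = PySem.Dict.mk [("N", 0), ("-", 0), ("*", 0)] := by decide
  rw [h0, a_loop]
  have hc : ∀ c : Char,
      (seq.toList.map (fun ch => String.ofList [ch])).count (String.ofList [c])
        = PySem.Str.count seq (String.ofList [c]) := by
    intro c
    rw [List.count_map_of_injective _ _ ofList_injective, str_count_singleton]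
  have hN : ("N" : String) = String.ofList ['N'] := by decide
  have hD : ("-" : String) = String.ofList ['-'] := by decide
  have hS : ("*" : String) = String.ofList ['*'] := by decide
  simp only [List.map, hN, hD, hS, hc]
  norm_num
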